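-- pv_equiv track=rewrite | github.com/xychenmsn/llm_spider | parser_designer.py | _format_code_blocks
-- ===== SOURCE A (Python) =====
-- def _format_code_blocks(text: str) -> str:
--     """Format code blocks in the text."""
--     # Simple code block formatting (can be enhanced)
--     in_code_block = False
--     lines = text.split('\n')
--     formatted_lines = []
--
--     i = 0
--     while i < len(lines):
--         line = lines[i]
--
--         # Check for code block markers
--         if line.strip().startswith('```'):
--             if not in_code_block:
--                 # Start of code block
--                 language = line.strip()[3:].strip()
--                 formatted_lines.append(f'<pre style="background-color: #f5f5f5; padding: 10px; border-radius: 5px; font-family: monospace;">')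
--                 in_code_block = True
--             else:
--                 # End of code block
--                 formatted_lines.append('</pre>')
--                 in_code_block = False
--         elif in_code_block:
--             # Inside code block
--             formatted_lines.append(line.replace('<', '&lt;').replace('>', '&gt;'))
--         else:
--             # Regular text
--             formatted_lines.append(line)
--
--         i += 1
--
--     # Close any open code block
--     if in_code_block:
--         formatted_lines.append('</pre>')
--
--     return '\n'.join(formatted_lines)
-- ===== SOURCE B (Python) =====
-- _PRE = '<pre style="background-color: #f5f5f5; padding: 10px; border-radius: 5px; font-family: monospace;">'
--
--
-- def _split_on_fences(lines):
--     """Stage 1: partition the line list into segments delimited by fence lines.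
--
--     Fence lines are consumed; the result always has len == number_of_fences + 1,
--     so segments at even positions are plaintext and at odd positions code."""
--     segs, cur = [], []
--     for ln in lines:
--         if ln.strip().startswith('```'):
--             segs.append(cur)
--             cur = []
--         else:
--             cur.append(ln)
--     segs.append(cur)
--     return segs
--
--
-- def _render_segment(idx, seg):
--     """Stage 2 helper: a plaintext segment verbatim, a code segment wrapped and escaped."""
--     if idx % 2 == 0:
--         return seg
--     return [_PRE] + [l.replace('<', '&lt;').replace('>', '&gt;') for l in seg] + ['</pre>']
--
--
-- def _format_code_blocks(text: str) -> str:
--     """Format code blocks: split on fences, then render segments by index parity."""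
--     segments = _split_on_fences(text.split('\n'))
--     pieces = [p for idx, seg in enumerate(segments) for p in _render_segment(idx, seg)]
--     return '\n'.join(pieces)
-- ===== Notes on version B (the rewrite author's own statement) =====
-- stated objective: alternative
-- what changed: Replaces A's single-pass boolean state machine with a staged pipeline: first split the line list into fence-delimited segments, then render each segment by its index parity (even = verbatim plaintext, odd = escaped code wrapped in <pre>/</pre>).
import Mathlib
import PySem

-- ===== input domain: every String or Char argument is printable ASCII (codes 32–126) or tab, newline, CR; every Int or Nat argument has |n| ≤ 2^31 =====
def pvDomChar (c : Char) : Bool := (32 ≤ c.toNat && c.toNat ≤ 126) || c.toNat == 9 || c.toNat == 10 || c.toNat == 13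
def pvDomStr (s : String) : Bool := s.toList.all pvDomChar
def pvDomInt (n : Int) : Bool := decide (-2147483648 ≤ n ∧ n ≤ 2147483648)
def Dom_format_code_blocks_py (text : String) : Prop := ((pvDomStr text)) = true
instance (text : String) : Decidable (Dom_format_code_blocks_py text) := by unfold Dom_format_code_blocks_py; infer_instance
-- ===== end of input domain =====

-- A = single-pass boolean state machine; B = two-stage: split the lines into fence-delimited segments, then render each segment by index parity (alternative decomposition, same cost).


-- ===== PORT A =====
-- line.strip().startswith('```')
def pvFence (line : String) : Bool := PySem.Str.startswith (PySem.Str.strip line) "```"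
-- line.replace('<', '&lt;').replace('>', '&gt;')
def pvEsc (line : String) : String := PySem.Str.replace (PySem.Str.replace line "<" "&lt;") ">" "&gt;"
def pvPreTag : String := "<pre style=\"background-color: #f5f5f5; padding: 10px; border-radius: 5px; font-family: monospace;\">"

-- A's while loop over lines with state (in_code_block, formatted_lines); the
-- trailing close of an open block is the [] case with inCode = true.
def pvLoopA : List String → Bool → List String → List String
  | [], inCode, acc => if inCode then acc ++ ["</pre>"] else acc
  | line :: rest, inCode, acc =>
    if pvFence line then
      if !inCode then pvLoopA rest true (acc ++ [pvPreTag])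
      else pvLoopA rest false (acc ++ ["</pre>"])
    else if inCode then pvLoopA rest inCode (acc ++ [pvEsc line])
    else pvLoopA rest inCode (acc ++ [line])

def format_code_blocks_py (text : String) : String :=
  PySem.Str.join "\n" (pvLoopA ((PySem.Str.split? text "\n").getD []) false [])

-- ===== PORT B =====
-- Stage 1 (_split_on_fences): fold over the lines with state (segs, cur),
-- closing the current segment at every fence line; final 'segs.append(cur)'.
def pvSplitStep (st : List (List String) × List String) (line : String) :
    List (List String) × List String :=
  if pvFence line then (st.1 ++ [st.2], []) else (st.1, st.2 ++ [line])

def pvSplitFences (lines : List String) : List (List String) :=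
  let st := lines.foldl pvSplitStep ([], [])
  st.1 ++ [st.2]

-- Stage 2 (_render_segment): even-indexed segments verbatim, odd-indexed wrapped/escaped.
def pvRenderSeg (idx : Int) (seg : List String) : List String :=
  if PySem.Int.mod idx 2 == 0 then seg
  else pvPreTag :: seg.map pvEsc ++ ["</pre>"]

def format_code_blocks_py_alt (text : String) : String :=
  PySem.Str.join "\n"
    ((PySem.List.enumerate (pvSplitFences ((PySem.Str.split? text "\n").getD []))).flatMap
      (fun p => pvRenderSeg p.1 p.2))

-- ===== PRECONDITION & SPEC =====
def Spec_format_code_blocks_py (text : String) (out : String) : Prop := out = format_code_blocks_py_alt text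
instance (text : String) (out : String) : Decidable (Spec_format_code_blocks_py text out) := by unfold Spec_format_code_blocks_py; infer_instance

-- ===== CLAIM (what is proved, stated in full; the proofs are below) =====
def Claim_equal_format_code_blocks_py : Prop := ∀ (text : String), Dom_format_code_blocks_py text → Spec_format_code_blocks_py text (format_code_blocks_py text)

-- ===== LEMMAS AND PROOFS =====

-- Recursive characterisation of stage 1.
def pvSplitR : List String → List (List String)
  | [] => [[]]
  | l :: rest =>
    if pvFence l then [] :: pvSplitR rest
    else
      match pvSplitR rest with
      | s :: ss => (l :: s) :: ss
      | [] => [[l]]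

theorem pvSplitR_ne_nil (lines : List String) : pvSplitR lines ≠ [] := by
  cases lines with
  | nil => simp [pvSplitR]
  | cons l rest =>
    simp only [pvSplitR]
    split <;> [simp; (split <;> simp)]

def pvConsHead (cur : List String) : List (List String) → List (List String)
  | s :: ss => (cur ++ s) :: ss
  | [] => [cur]

theorem pvSplit_fold (lines : List String) (segs : List (List String)) (cur : List String) :
    (lines.foldl pvSplitStep (segs, cur)).1 ++ [(lines.foldl pvSplitStep (segs, cur)).2]
      = segs ++ pvConsHead cur (pvSplitR lines) := by
  induction lines generalizing segs cur with
  | nil => simp [pvSplitR, pvConsHead]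
  | cons l rest ih =>
    by_cases h : pvFence l = true
    · simp only [List.foldl_cons, pvSplitStep, h, if_pos, pvSplitR]
      rw [ih]
      rcases hr : pvSplitR rest with _ | ⟨s, ss⟩
      · exact absurd hr (pvSplitR_ne_nil rest)
      · simp [pvConsHead]
    · simp only [List.foldl_cons, pvSplitStep, h, if_false, Bool.false_eq_true, pvSplitR]
      rw [ih]
      rcases hr : pvSplitR rest with _ | ⟨s, ss⟩
      · exact absurd hr (pvSplitR_ne_nil rest)
      · simp [pvConsHead]

theorem pvSplitFences_eq (lines : List String) : pvSplitFences lines = pvSplitR lines := by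
  unfold pvSplitFences
  rw [pvSplit_fold]
  rcases hr : pvSplitR lines with _ | ⟨s, ss⟩
  · exact absurd hr (pvSplitR_ne_nil lines)
  · simp [pvConsHead]

-- Alternating renderer: the flag says whether the next segment is a code segment.
def pvRenderAlt : List (List String) → Bool → List String
  | [], _ => []
  | s :: ss, false => s ++ pvRenderAlt ss true
  | s :: ss, true => pvPreTag :: (s.map pvEsc ++ "</pre>" :: pvRenderAlt ss false)

theorem pvMod_two (k : Nat) : PySem.Int.mod (k : Int) 2 = ((k % 2 : Nat) : Int) :=
  PySem.Int.mod_natCast k 2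

theorem pvEnum_flat (segs : List (List String)) (k : Nat) :
    (PySem.List.enumerate segs (k : Int)).flatMap (fun p => pvRenderSeg p.1 p.2)
      = pvRenderAlt segs (decide (k % 2 = 1)) := by
  induction segs generalizing k with
  | nil => simp [PySem.List.enumerate_nil, pvRenderAlt]
  | cons s ss ih =>
    rw [PySem.List.enumerate_cons, List.flatMap_cons]
    have : ((k : Int) + 1) = ((k + 1 : Nat) : Int) := by push_cast; ring
    rw [this, ih (k + 1)]
    have hcond : (PySem.Int.mod (k : Int) 2 == 0) = decide (k % 2 = 0) := by
      rw [pvMod_two]; rcases Nat.mod_two_eq_zero_or_one k with h | h <;> simp [h]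
    simp only [pvRenderSeg]
    rw [hcond]
    by_cases hk : k % 2 = 1
    · have h2 : (k + 1) % 2 = 0 := by omega
      have hk0 : ¬ k % 2 = 0 := by omega
      simp [hk, h2, pvRenderAlt]
    · have hk0 : k % 2 = 0 := by omega
      have h2 : (k + 1) % 2 = 1 := by omega
      simp [hk0, h2, pvRenderAlt]

-- The tail of a code block as A renders it (escaped lines, '</pre>', rest).
def pvCodeOf : List (List String) → List String
  | s :: ss => s.map pvEsc ++ "</pre>" :: pvRenderAlt ss false
  | [] => ["</pre>"]

theorem pvLoopA_eq (lines : List String) (inCode : Bool) (acc : List String) :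
    pvLoopA lines inCode acc
      = acc ++ (if inCode then pvCodeOf (pvSplitR lines) else pvRenderAlt (pvSplitR lines) false) := by
  induction lines generalizing inCode acc with
  | nil => cases inCode <;> simp [pvLoopA, pvSplitR, pvCodeOf, pvRenderAlt]
  | cons l rest ih =>
    by_cases h : pvFence l = true
    · cases inCode with
      | false =>
        simp only [pvLoopA, h, if_pos, Bool.not_false, pvSplitR]
        rw [ih]
        rcases hr : pvSplitR rest with _ | ⟨s, ss⟩
        · exact absurd hr (pvSplitR_ne_nil rest)
        · simp [pvCodeOf, pvRenderAlt]
      | true =>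
        simp only [pvLoopA, h, if_pos, Bool.not_true, Bool.false_eq_true, if_false, pvSplitR]
        rw [ih]
        simp [pvCodeOf]
    · cases inCode with
      | false =>
        simp only [pvLoopA, h, Bool.false_eq_true, if_false, pvSplitR]
        rw [ih]
        rcases hr : pvSplitR rest with _ | ⟨s, ss⟩
        · exact absurd hr (pvSplitR_ne_nil rest)
        · simp [pvRenderAlt]
      | true =>
        simp only [pvLoopA, h, Bool.false_eq_true, if_false, if_true, pvSplitR]
        rw [ih]
        rcases hr : pvSplitR rest with _ | ⟨s, ss⟩
        · exact absurd hr (pvSplitR_ne_nil rest)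
        · simp [pvCodeOf]

-- ===== VERDICT (by name: the statement is the Claim_ definition above) =====
theorem format_code_blocks_py_spec : Claim_equal_format_code_blocks_py := by
  intro text _
  unfold Spec_format_code_blocks_py format_code_blocks_py format_code_blocks_py_alt
  rw [pvSplitFences_eq]
  have h0 : (0 : Int) = ((0 : Nat) : Int) := rfl
  rw [show PySem.List.enumerate (pvSplitR ((PySem.Str.split? text "\n").getD []))
        = PySem.List.enumerate (pvSplitR ((PySem.Str.split? text "\n").getD [])) ((0 : Nat) : Int) from rfl,
      pvEnum_flat, pvLoopA_eq]
  simp
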